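-- pv_equiv track=rewrite | github.com/puredrinkology/website | python_utils/main.py | identify_base_spirit
-- ===== SOURCE A (Python) =====
-- def identify_base_spirit(ingredients):
--     base_spirits = {
--         'Bourbon': ['bourbon'],
--         'Whiskey': ['whiskey', 'whisky', 'jack daniels', 'johnnie walker', 'jim beam'],
--         'Rye': ['rye'],
--         'Gin': ['gin'],
--         'Vodka': ['vodka'],
--         'Rum': ['rum', 'rhum', 'cachaca'],
--         'Tequila': ['tequila', 'mezcal'],
--         'Brandy': ['brandy', 'cognac', 'armagnac'],
--         'Scotch': ['scotch'],
--         'Wine': ['rose', 'red wine', 'white wine', 'champagne', 'cabernet', 'merlot', 'sauvignon blanc', 'reisling']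
--         # Add more as needed
--     }
--
--     for spirit, aliases in base_spirits.items():
--         for ingredient in ingredients:
--             if any(alias in ingredient['item'].lower() for alias in aliases):
--                 return spirit.lower()
--     return None
-- ===== SOURCE B (Python) =====
-- # Flat alias table in priority order: (alias, priority, spirit).
-- _ALIAS_TABLE = [
--     ('bourbon', 0, 'Bourbon'),
--     ('whiskey', 1, 'Whiskey'), ('whisky', 1, 'Whiskey'), ('jack daniels', 1, 'Whiskey'),
--     ('johnnie walker', 1, 'Whiskey'), ('jim beam', 1, 'Whiskey'),
--     ('rye', 2, 'Rye'),
--     ('gin', 3, 'Gin'),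
--     ('vodka', 4, 'Vodka'),
--     ('rum', 5, 'Rum'), ('rhum', 5, 'Rum'), ('cachaca', 5, 'Rum'),
--     ('tequila', 6, 'Tequila'), ('mezcal', 6, 'Tequila'),
--     ('brandy', 7, 'Brandy'), ('cognac', 7, 'Brandy'), ('armagnac', 7, 'Brandy'),
--     ('scotch', 8, 'Scotch'),
--     ('rose', 9, 'Wine'), ('red wine', 9, 'Wine'), ('white wine', 9, 'Wine'),
--     ('champagne', 9, 'Wine'), ('cabernet', 9, 'Wine'), ('merlot', 9, 'Wine'),
--     ('sauvignon blanc', 9, 'Wine'), ('reisling', 9, 'Wine'),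
-- ]
--
-- def identify_base_spirit(ingredients):
--     # single ingredient-major pass keeping the best (smallest) priority seen
--     best = None
--     for ingredient in ingredients:
--         item = ingredient['item'].lower()
--         hit = next((entry for entry in _ALIAS_TABLE if entry[0] in item), None)
--         if hit is not None and (best is None or hit[1] < best[0]):
--             best = (hit[1], hit[2])
--     return best[1].lower() if best is not None else None
-- ===== Notes on version B (the rewrite author's own statement) =====
-- stated objective: alternative
-- what changed: A scans spirit-major with early return (re-scanning all ingredients for each spirit); B flattens the alias dict once into a priority-ordered table and makes a single ingredient-major pass keeping a running minimum priority, lowercasing each ingredient's item once.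
-- outside the precondition, e.g. on identify_base_spirit([{'item': 'bourbon'}, {}]): A returns 'bourbon', B raises KeyError
import Mathlib
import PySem

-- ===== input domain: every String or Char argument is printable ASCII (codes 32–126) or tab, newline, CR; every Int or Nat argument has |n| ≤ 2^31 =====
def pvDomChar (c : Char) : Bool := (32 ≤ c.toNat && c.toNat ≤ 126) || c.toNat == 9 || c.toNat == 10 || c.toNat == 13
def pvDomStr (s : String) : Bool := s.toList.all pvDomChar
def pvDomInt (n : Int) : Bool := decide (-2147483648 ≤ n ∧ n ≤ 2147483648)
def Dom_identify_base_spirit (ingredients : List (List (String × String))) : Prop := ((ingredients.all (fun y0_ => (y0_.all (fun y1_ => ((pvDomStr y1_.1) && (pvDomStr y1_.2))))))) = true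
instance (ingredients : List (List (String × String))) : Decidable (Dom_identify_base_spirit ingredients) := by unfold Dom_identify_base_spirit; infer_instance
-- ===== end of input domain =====

-- B replaces A's spirit-major scan with early return by one ingredient-major pass
-- over a flattened priority table, keeping a running minimum priority (alternative
-- decomposition, same cost class); equivalence is about the return value.

-- ===== PORT A =====
-- the base_spirits dict of A, in insertion order
def pvSpiritsA : List (String × List String) :=
  [("Bourbon", ["bourbon"]),
   ("Whiskey", ["whiskey", "whisky", "jack daniels", "johnnie walker", "jim beam"]),
   ("Rye", ["rye"]),
   ("Gin", ["gin"]),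
   ("Vodka", ["vodka"]),
   ("Rum", ["rum", "rhum", "cachaca"]),
   ("Tequila", ["tequila", "mezcal"]),
   ("Brandy", ["brandy", "cognac", "armagnac"]),
   ("Scotch", ["scotch"]),
   ("Wine", ["rose", "red wine", "white wine", "champagne", "cabernet", "merlot", "sauvignon blanc", "reisling"])]

-- A's outer 'for spirit, aliases in base_spirits.items(): … return spirit.lower()'
-- ingredient['item'] is ported as Dict.getD under Pre_ (the key is present)
def pvALoop (ingredients : List (List (String × String))) : List (String × List String) → Option String
  | [] => none
  | (spirit, aliases) :: rest =>
    if ingredients.any (fun ing => aliases.any (fun al =>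
        PySem.Str.isIn al (PySem.Str.lower (PySem.Dict.getD (PySem.Dict.mk ing) "item" "")))) then
      some (PySem.Str.lower spirit)
    else
      pvALoop ingredients rest

def identify_base_spirit (ingredients : List (List (String × String))) : Option String :=
  pvALoop ingredients pvSpiritsA

-- ===== PORT B =====
-- Source B's flat alias table literal: (alias, priority, spirit) in priority order
def pvTableB : List (String × Int × String) :=
  [("bourbon", 0, "Bourbon"),
   ("whiskey", 1, "Whiskey"), ("whisky", 1, "Whiskey"), ("jack daniels", 1, "Whiskey"),
   ("johnnie walker", 1, "Whiskey"), ("jim beam", 1, "Whiskey"),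
   ("rye", 2, "Rye"),
   ("gin", 3, "Gin"),
   ("vodka", 4, "Vodka"),
   ("rum", 5, "Rum"), ("rhum", 5, "Rum"), ("cachaca", 5, "Rum"),
   ("tequila", 6, "Tequila"), ("mezcal", 6, "Tequila"),
   ("brandy", 7, "Brandy"), ("cognac", 7, "Brandy"), ("armagnac", 7, "Brandy"),
   ("scotch", 8, "Scotch"),
   ("rose", 9, "Wine"), ("red wine", 9, "Wine"), ("white wine", 9, "Wine"),
   ("champagne", 9, "Wine"), ("cabernet", 9, "Wine"), ("merlot", 9, "Wine"),
   ("sauvignon blanc", 9, "Wine"), ("reisling", 9, "Wine")]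

-- Source B's single pass: per ingredient take the first matching table entry ('next(…)'),
-- keep the (priority, spirit) with the smallest priority seen so far
def identify_base_spirit_alt (ingredients : List (List (String × String))) : Option String :=
  (ingredients.foldl (fun best ing =>
      let item := PySem.Str.lower (PySem.Dict.getD (PySem.Dict.mk ing) "item" "")
      match pvTableB.find? (fun e => PySem.Str.isIn e.1 item) with
      | none => best
      | some e =>
        match best with
        | none => some (e.2.1, e.2.2)
        | some b => if e.2.1 < b.1 then some (e.2.1, e.2.2) else some b) none).map
    (fun b => PySem.Str.lower b.2)

-- ===== PRECONDITION & SPEC =====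
-- Pre_ excludes ingredient dicts without an 'item' key: Python A raises KeyError on
-- them whenever it scans that far (and returns only by accident of scan order when an
-- earlier ingredient matches the first spirit), while B always raises there.
def Pre_identify_base_spirit (ingredients : List (List (String × String))) : Prop :=
  (ingredients.all (fun ing => (PySem.Dict.mk ing).contains "item")) = true
instance (ingredients : List (List (String × String))) : Decidable (Pre_identify_base_spirit ingredients) := by
  unfold Pre_identify_base_spirit; infer_instance

def pvWitness_identify_base_spirit : (List (List (String × String))) :=
  [[("item", "Gin and tonic")], [("item", "rum")]]

def Spec_identify_base_spirit (ingredients : List (List (String × String))) (out : Option String) : Prop := out = identify_base_spirit_alt ingredients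
instance (ingredients : List (List (String × String))) (out : Option String) : Decidable (Spec_identify_base_spirit ingredients out) := by unfold Spec_identify_base_spirit; infer_instance

-- ===== CLAIM (what is proved, stated in full; the proofs are below) =====
def Claim_equal_identify_base_spirit : Prop := ∀ (ingredients : List (List (String × String))), Dom_identify_base_spirit ingredients → Pre_identify_base_spirit ingredients → Spec_identify_base_spirit ingredients (identify_base_spirit ingredients)

-- ===== LEMMAS AND PROOFS =====

-- the lowercased 'item' of an ingredient
def pvItem (ing : List (String × String)) : String :=
  PySem.Str.lower (PySem.Dict.getD (PySem.Dict.mk ing) "item" "")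

-- keep the entry with the strictly smaller index; ties and none prefer the left
def pvMerge {α : Type} (a b : Option (Int × α)) : Option (Int × α) :=
  match a, b with
  | none, b => b
  | some x, none => some x
  | some x, some y => if y.1 < x.1 then some y else some x

theorem pvMerge_none_right {α : Type} (a : Option (Int × α)) : pvMerge a none = a := by
  cases a <;> rfl

theorem pvMerge_assoc {α : Type} (a b c : Option (Int × α)) :
    pvMerge (pvMerge a b) c = pvMerge a (pvMerge b c) := by
  cases a <;> cases b <;> cases c <;>
    simp only [pvMerge] <;> split_ifs <;>
    simp only [pvMerge] <;> split_ifs <;> first | rfl | omega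

theorem pvMerge_map {α β : Type} (f : α → β) (a b : Option (Int × α)) :
    (pvMerge a b).map (Prod.map id f) = pvMerge (a.map (Prod.map id f)) (b.map (Prod.map id f)) := by
  cases a <;> cases b <;>
    simp only [pvMerge, Option.map_some, Option.map_none, Prod.map_fst, id_eq] <;>
    split_ifs <;> first | rfl | omega

-- A's loop is find? over the (enumerated) spirit list
theorem pvALoop_eq_find (ingredients : List (List (String × String)))
    (L : List (String × List String)) (s : Int) :
    pvALoop ingredients L =
      ((PySem.List.enumerate L s).find? (fun kp => ingredients.any (fun ing =>
          kp.2.2.any (fun al => PySem.Str.isIn al (pvItem ing))))).map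
        (fun kp => PySem.Str.lower kp.2.1) := by
  induction L generalizing s with
  | nil => rfl
  | cons p rest ih =>
    obtain ⟨spirit, aliases⟩ := p
    rw [PySem.List.enumerate_cons]
    have hrw : pvALoop ingredients ((spirit, aliases) :: rest)
        = if (ingredients.any fun ing => aliases.any fun al => PySem.Str.isIn al (pvItem ing))
          then some (PySem.Str.lower spirit) else pvALoop ingredients rest := rfl
    by_cases h : (ingredients.any fun ing => aliases.any fun al =>
        PySem.Str.isIn al (pvItem ing)) = true
    · rw [hrw, if_pos h, List.find?_cons_of_pos (by simpa using h), Option.map_some]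
    · rw [hrw, if_neg h, List.find?_cons_of_neg (by simpa using h), ih (s + 1)]

-- find? over a disjunction on a list with strictly increasing indices is pvMerge of the find?s
theorem pvFind_or_merge {α : Type} (E : List (Int × α))
    (hE : E.Pairwise (fun x y => x.1 < y.1)) (p q : Int × α → Bool) :
    E.find? (fun e => p e || q e) = pvMerge (E.find? p) (E.find? q) := by
  induction E with
  | nil => rfl
  | cons e E ih =>
    rw [List.pairwise_cons] at hE
    have hlt := hE.1
    by_cases hp : p e = true
    · rw [List.find?_cons_of_pos (p := fun e => p e || q e) (by simp [hp]),
        List.find?_cons_of_pos hp]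
      by_cases hq : q e = true
      · rw [List.find?_cons_of_pos hq]; simp [pvMerge]
      · rw [List.find?_cons_of_neg hq]
        rcases hfq : E.find? q with _ | f
        · rfl
        · have := hlt f (List.mem_of_find?_eq_some hfq)
          simp only [pvMerge]; rw [if_neg (by omega)]
    · by_cases hq : q e = true
      · rw [List.find?_cons_of_pos (p := fun e => p e || q e) (by simp [hp, hq]),
          List.find?_cons_of_neg hp, List.find?_cons_of_pos hq]
        rcases hfp : E.find? p with _ | f
        · rfl
        · have := hlt f (List.mem_of_find?_eq_some hfp)
          simp only [pvMerge]; rw [if_pos (by omega)]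
      · rw [List.find?_cons_of_neg (p := fun e => p e || q e) (by simp [hp, hq]),
          List.find?_cons_of_neg hp, List.find?_cons_of_neg hq]
        exact ih hE.2

-- finding the first matching alias in the flattened table = finding the first spirit with a matching alias
theorem pvFlat_find (L : List (String × List String)) (s : Int) (q : String → Bool) :
    (((PySem.List.enumerate L s).flatMap (fun kp => kp.2.2.map (fun al => (al, kp.1, kp.2.1)))).find?
        (fun e => q e.1)).map (fun e => e.2)
      = ((PySem.List.enumerate L s).find? (fun kp => kp.2.2.any q)).map (fun kp => (kp.1, kp.2.1)) := by
  induction L generalizing s with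
  | nil => rfl
  | cons p rest ih =>
    obtain ⟨spirit, aliases⟩ := p
    rw [PySem.List.enumerate_cons, List.flatMap_cons, List.find?_append, List.find?_map]
    rcases hfa : aliases.find? q with _ | a
    · have hany : aliases.any q = false := by
        rw [List.any_eq_false]; intro a ha
        simpa using List.find?_eq_none.mp hfa a ha
      simp only [List.find?]
      have : (aliases.find? (((fun e => q e.1)) ∘ (fun al => (al, s, spirit)))) = none := by
        rw [List.find?_eq_none]; intro a ha
        simpa using List.find?_eq_none.mp hfa a ha
      rw [this]
      simp only [Option.map_none, Option.none_or, hany, cond_false]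
      exact ih (s + 1)
    · have hq : q a = true := List.find?_some hfa
      have hany : aliases.any q = true :=
        List.any_eq_true.mpr ⟨a, List.mem_of_find?_eq_some hfa, hq⟩
      have : (aliases.find? (((fun e => q e.1)) ∘ (fun al => (al, s, spirit)))) = some a := by
        simpa using hfa
      simp [List.find?, this, hany]

-- the predicate used per ingredient on the enumerated spirit list
def pvP1 (ing : List (String × String)) (kp : Int × String × List String) : Bool :=
  kp.2.2.any (fun al => PySem.Str.isIn al (pvItem ing))

-- the enumerated spirit list
def pvE : List (Int × String × List String) := PySem.List.enumerate pvSpiritsA 0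

-- per-ingredient best entry, as B computes it
def pvHit (ing : List (String × String)) : Option (Int × String) :=
  (pvTableB.find? (fun e => PySem.Str.isIn e.1 (pvItem ing))).map (fun e => e.2)

theorem pvHit_eq (ing : List (String × String)) :
    pvHit ing = (pvE.find? (pvP1 ing)).map (Prod.map id Prod.fst) := by
  have ht : pvTableB = (PySem.List.enumerate pvSpiritsA 0).flatMap
      (fun kp => kp.2.2.map (fun al => (al, kp.1, kp.2.1))) := by decide
  have := pvFlat_find pvSpiritsA 0 (fun al => PySem.Str.isIn al (pvItem ing))
  simpa [pvHit, ht, pvE, pvP1, Prod.map] using this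

-- A's find? over all ingredients decomposes into a foldr of pvMerge of per-ingredient find?s
theorem pvA_foldr (ingredients : List (List (String × String))) :
    pvE.find? (fun kp => ingredients.any (fun ing => pvP1 ing kp))
      = ingredients.foldr (fun ing acc => pvMerge (pvE.find? (pvP1 ing)) acc) none := by
  induction ingredients with
  | nil =>
    simp only [List.any_nil, List.foldr_nil]
    rw [List.find?_eq_none]; intro _ _; simp
  | cons ing rest ih =>
    have h := pvFind_or_merge pvE (PySem.List.pairwise_lt_enumerate pvSpiritsA 0)
      (pvP1 ing) (fun kp => rest.any (fun i => pvP1 i kp))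
    simp only [List.any_cons, List.foldr_cons, ← ih, ← h]

-- B's foldl step is pvMerge with the per-ingredient hit
theorem pvB_foldl (ingredients : List (List (String × String)))
    (best : Option (Int × String)) :
    ingredients.foldl (fun best ing =>
        let item := PySem.Str.lower (PySem.Dict.getD (PySem.Dict.mk ing) "item" "")
        match pvTableB.find? (fun e => PySem.Str.isIn e.1 item) with
        | none => best
        | some e =>
          match best with
          | none => some (e.2.1, e.2.2)
          | some b => if e.2.1 < b.1 then some (e.2.1, e.2.2) else some b) best
      = pvMerge best (ingredients.foldr (fun ing acc => pvMerge (pvHit ing) acc) none) := by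
  induction ingredients generalizing best with
  | nil => simp [pvMerge_none_right]
  | cons ing rest ih =>
    rw [List.foldl_cons, List.foldr_cons, ih, ← pvMerge_assoc]
    congr 1
    rcases hf : pvTableB.find? (fun e => PySem.Str.isIn e.1 (pvItem ing)) with _ | e
    · simp only [pvItem] at hf
      simp only [pvHit, pvItem, hf, Option.map_none, pvMerge_none_right]
    · simp only [pvItem] at hf
      simp only [pvHit, pvItem, hf, Option.map_some]
      cases best with
      | none => rfl
      | some b => simp [pvMerge]

-- pushing an index-preserving map through the merge-foldr
theorem pvFoldr_map {α β γ : Type} (f : α → β) (h : γ → Option (Int × α))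
    (l : List γ) :
    (l.foldr (fun x acc => pvMerge (h x) acc) none).map (Prod.map id f)
      = l.foldr (fun x acc => pvMerge ((h x).map (Prod.map id f)) acc) none := by
  induction l with
  | nil => rfl
  | cons x l ih => rw [List.foldr_cons, List.foldr_cons, pvMerge_map, ih]

-- ===== VERDICT (by name: the statement is the Claim_ definition above) =====
theorem identify_base_spirit_spec : Claim_equal_identify_base_spirit := by
  intro ingredients _ _
  show identify_base_spirit ingredients = identify_base_spirit_alt ingredients
  rw [identify_base_spirit, pvALoop_eq_find ingredients pvSpiritsA 0]
  have hA : (PySem.List.enumerate pvSpiritsA 0).find? (fun kp => ingredients.any (fun ing =>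
      kp.2.2.any (fun al => PySem.Str.isIn al (pvItem ing)))) =
      pvE.find? (fun kp => ingredients.any (fun ing => pvP1 ing kp)) := rfl
  rw [hA, pvA_foldr]
  rw [identify_base_spirit_alt, pvB_foldl ingredients none]
  show (ingredients.foldr (fun ing acc => pvMerge (pvE.find? (pvP1 ing)) acc) none).map
      (fun kp => PySem.Str.lower kp.2.1)
    = (pvMerge none (ingredients.foldr (fun ing acc => pvMerge (pvHit ing) acc) none)).map
      (fun b => PySem.Str.lower b.2)
  have hmap : ∀ (o : Option (Int × String × List String)),
      o.map (fun kp => PySem.Str.lower kp.2.1)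
        = (o.map (Prod.map id Prod.fst)).map (fun b => PySem.Str.lower b.2) := by
    intro o; cases o <;> rfl
  rw [hmap, pvFoldr_map, show pvMerge none = id from rfl]
  simp only [id_eq]
  simp only [pvHit_eq]
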